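-- pv_equiv track=rewrite | github.com/HenriqueCord/comexstat_pesticide_viz | comexstat_viz/dashboard/fetch_data.py | create_id_to_classification_map
-- ===== SOURCE A (Python) =====
-- NCM_IDS_PREFIX_DICT = {
--     "PESTICIDES": "38081",
--     "FUNGICIDES": "38082",
--     "HERBICIDES": "38083",
--     "DESINFETANTES": "38084",
--     "UNCLEAR": "38085",  # TODO descobrir oq é o 85
--     "OTHERS": "38089",
--     "DDT": "29039220",  # NOT A PREFIX ..... but will work
--     "DDT": "29036220",  # NOT A PREFIX .....
-- }
--
-- def create_id_to_classification_map(
--     response_data: list, prefix_dict: dict = NCM_IDS_PREFIX_DICT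
-- ):
--     """
--     Create a mapping dictionary from ID to classification.
--
--     Args:
--         response_data (list): List of dictionaries containing 'id'.
--         prefix_dict (dict): Dictionary of prefixes to match.
--
--     Returns:
--         dict: A dictionary mapping IDs to their classification.
--     """
--     id_to_classification = {}
--
--     for item in response_data:
--         item_id = item["id"]  # ID is a string
--
--         for classification, prefix in prefix_dict.items():
--             if item_id.startswith(prefix):
--                 id_to_classification[item["id"]] = classification
--                 break
--
--     return id_to_classification
-- ===== SOURCE B (Python) =====
-- NCM_IDS_PREFIX_DICT = {
--     "PESTICIDES": "38081",
--     "FUNGICIDES": "38082",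
--     "HERBICIDES": "38083",
--     "DESINFETANTES": "38084",
--     "UNCLEAR": "38085",
--     "OTHERS": "38089",
--     "DDT": "29039220",
--     "DDT": "29036220",
-- }
--
--
-- def create_id_to_classification_map(
--     response_data: list, prefix_dict: dict = NCM_IDS_PREFIX_DICT
-- ):
--     # Inverted nesting: each prefix claims the still-unclassified ids it matches,
--     # then the result is laid out in first-occurrence order over response_data.
--     best = {}
--     for classification, prefix in prefix_dict.items():
--         for item in response_data:
--             item_id = item["id"]
--             if item_id not in best and item_id.startswith(prefix):
--                 best[item_id] = classification
--     return {
--         item["id"]: best[item["id"]]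
--         for item in response_data
--         if item["id"] in best
--     }
-- ===== Notes on version B (the rewrite author's own statement) =====
-- stated objective: alternative
-- what changed: Inverts the loop nesting: prefixes become the outer loop, each prefix claiming the still-unclassified ids it matches into a 'best' map, and a final pass over response_data lays the result out in A's first-occurrence order; A instead scans the prefix list per item with a break.
import Mathlib
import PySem

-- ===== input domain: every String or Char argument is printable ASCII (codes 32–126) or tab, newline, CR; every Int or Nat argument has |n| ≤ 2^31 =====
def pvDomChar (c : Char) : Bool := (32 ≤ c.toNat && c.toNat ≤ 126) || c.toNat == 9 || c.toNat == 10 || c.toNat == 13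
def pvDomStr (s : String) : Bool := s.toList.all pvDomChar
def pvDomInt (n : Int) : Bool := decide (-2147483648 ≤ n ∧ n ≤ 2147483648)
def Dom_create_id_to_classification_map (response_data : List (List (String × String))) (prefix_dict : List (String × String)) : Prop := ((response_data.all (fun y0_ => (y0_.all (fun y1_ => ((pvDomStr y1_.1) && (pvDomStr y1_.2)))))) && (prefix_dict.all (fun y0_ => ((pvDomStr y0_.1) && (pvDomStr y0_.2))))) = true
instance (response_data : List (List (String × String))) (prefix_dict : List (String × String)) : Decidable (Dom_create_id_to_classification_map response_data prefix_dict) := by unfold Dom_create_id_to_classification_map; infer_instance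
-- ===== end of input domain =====

-- B inverts the loop nesting (prefixes outer, items inner, a final ordering pass); equivalence proved for the return value on inputs whose items all carry an "id" key.

-- ===== PORT A =====
-- A's inner loop: first (classification, prefix) of the dict whose prefix the id starts with
def pvFirstMatch : List (String × String) → String → Option String
  | [], _ => none
  | cp :: rest, s => if PySem.Str.startswith s cp.2 then some cp.1 else pvFirstMatch rest s

-- A's outer-loop body for one item
def pvAStep (pl : List (String × String)) (d : PySem.Dict String String) (item : List (String × String)) : PySem.Dict String String :=
  match (PySem.Dict.ofList item).get? "id" with
  | none => d  -- Python raises KeyError here; excluded by Pre_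
  | some item_id =>
    match pvFirstMatch pl item_id with
    | none => d
    | some classification => d.insert item_id classification

def create_id_to_classification_map (response_data : List (List (String × String))) (prefix_dict : List (String × String)) : List (String × String) :=
  (response_data.foldl (pvAStep (PySem.Dict.ofList prefix_dict).items) PySem.Dict.empty).items

-- ===== PORT B =====
-- B's inner loop: one (classification, prefix) pair claims every still-unclassified id it matches
def pvClaimPass (response_data : List (List (String × String))) (b : PySem.Dict String String) (cp : String × String) : PySem.Dict String String :=
  response_data.foldl (fun b item =>
    match (PySem.Dict.ofList item).get? "id" with
    | none => b  -- Python raises KeyError here; excluded by Pre_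
    | some item_id =>
      if !(b.contains item_id) && PySem.Str.startswith item_id cp.2 then b.insert item_id cp.1 else b) b

-- B's final comprehension body for one item
def pvBStep (best : PySem.Dict String String) (out : PySem.Dict String String) (item : List (String × String)) : PySem.Dict String String :=
  match (PySem.Dict.ofList item).get? "id" with
  | none => out
  | some item_id =>
    match best.get? item_id with
    | none => out
    | some classification => out.insert item_id classification

def create_id_to_classification_map_alt (response_data : List (List (String × String))) (prefix_dict : List (String × String)) : List (String × String) :=
  let best := (PySem.Dict.ofList prefix_dict).items.foldl (pvClaimPass response_data) PySem.Dict.empty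
  (response_data.foldl (pvBStep best) PySem.Dict.empty).items

-- ===== PRECONDITION & SPEC =====
-- Pre_ excludes inputs where some item lacks the key "id": Python A (and B) raise KeyError there.
def Pre_create_id_to_classification_map (response_data : List (List (String × String))) (prefix_dict : List (String × String)) : Prop :=
  ∀ item ∈ response_data, "id" ∈ item.map Prod.fst
instance (response_data : List (List (String × String))) (prefix_dict : List (String × String)) : Decidable (Pre_create_id_to_classification_map response_data prefix_dict) := by unfold Pre_create_id_to_classification_map; infer_instance

def pvWitness_create_id_to_classification_map : (List (List (String × String))) × (List (String × String)) :=
  ([[("id", "38081000")], [("id", "99999")]], [("PESTICIDES", "38081"), ("FUNGICIDES", "38082")])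

def Spec_create_id_to_classification_map (response_data : List (List (String × String))) (prefix_dict : List (String × String)) (out : List (String × String)) : Prop := out = create_id_to_classification_map_alt response_data prefix_dict
instance (response_data : List (List (String × String))) (prefix_dict : List (String × String)) (out : List (String × String)) : Decidable (Spec_create_id_to_classification_map response_data prefix_dict out) := by unfold Spec_create_id_to_classification_map; infer_instance

-- ===== CLAIM (what is proved, stated in full; the proofs are below) =====
def Claim_equal_create_id_to_classification_map : Prop := ∀ (response_data : List (List (String × String))) (prefix_dict : List (String × String)), Dom_create_id_to_classification_map response_data prefix_dict → Pre_create_id_to_classification_map response_data prefix_dict → Spec_create_id_to_classification_map response_data prefix_dict (create_id_to_classification_map response_data prefix_dict)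

-- ===== LEMMAS AND PROOFS =====

-- the ids occurring in response_data, in order
def pvIds (response_data : List (List (String × String))) : List String :=
  response_data.filterMap (fun item => (PySem.Dict.ofList item).get? "id")

lemma claimPass_get? (rd : List (List (String × String))) (cp : String × String)
    (b : PySem.Dict String String) (i : String) :
    (pvClaimPass rd b cp).get? i =
      (b.get? i).or (if i ∈ pvIds rd ∧ PySem.Str.startswith i cp.2 then some cp.1 else none) := by
  induction rd generalizing b with
  | nil => simp [pvClaimPass, pvIds]
  | cons item rd ih =>
    cases hj : (PySem.Dict.ofList item).get? "id" with
    | none =>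
      have hstep : pvClaimPass (item :: rd) b cp = pvClaimPass rd b cp := by
        simp [pvClaimPass, hj]
      have hids : pvIds (item :: rd) = pvIds rd := by
        simp [pvIds, hj]
      rw [hstep, ih, hids]
    | some j =>
      have hstep : pvClaimPass (item :: rd) b cp =
          pvClaimPass rd (if !(b.contains j) && PySem.Str.startswith j cp.2 then b.insert j cp.1 else b) cp := by
        simp [pvClaimPass, hj]
      have hids : pvIds (item :: rd) = j :: pvIds rd := by
        simp [pvIds, hj]
      rw [hstep, ih, hids]
      by_cases hij : i = j
      · subst hij
        by_cases hs : PySem.Chars.startswith i.toList cp.2.toList = true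
        · by_cases hc : b.contains i = true
          · obtain ⟨v, hv⟩ : ∃ v, b.get? i = some v := by
              rw [PySem.Dict.contains_eq_isSome_get?] at hc
              exact Option.isSome_iff_exists.mp hc
            simp [hc, hv]
          · have hn : b.get? i = none :=
              (PySem.Dict.get?_eq_none_iff_contains b i).mpr (by simpa using hc)
            simp [hc, hs, hn]
        · simp [hs]
      · have hne : (if !(b.contains j) && PySem.Str.startswith j cp.2 then b.insert j cp.1 else b).get? i = b.get? i := by
          split
          · exact PySem.Dict.get?_insert_of_ne _ _ hij
          · rfl
        rw [hne]
        simp only [List.mem_cons, hij, false_or]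

lemma best_get? (rd : List (List (String × String))) (pl : List (String × String))
    (b : PySem.Dict String String) (i : String) :
    (pl.foldl (pvClaimPass rd) b).get? i =
      (b.get? i).or (if i ∈ pvIds rd then pvFirstMatch pl i else none) := by
  induction pl generalizing b with
  | nil => simp [pvFirstMatch]
  | cons cp pl ih =>
    simp only [List.foldl_cons]
    rw [ih, claimPass_get?, Option.or_assoc]
    by_cases hm : i ∈ pvIds rd
    · by_cases hs : PySem.Chars.startswith i.toList cp.2.toList = true <;>
        simp [pvFirstMatch, hm, hs]
    · simp [hm]

lemma fold_eq (pl : List (String × String)) (best : PySem.Dict String String)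
    (rd : List (List (String × String))) (d : PySem.Dict String String)
    (h : ∀ i ∈ pvIds rd, best.get? i = pvFirstMatch pl i) :
    rd.foldl (pvAStep pl) d = rd.foldl (pvBStep best) d := by
  induction rd generalizing d with
  | nil => rfl
  | cons item rd ih =>
    have hsub : ∀ x ∈ pvIds rd, x ∈ pvIds (item :: rd) := by
      intro x hx
      simp only [pvIds, List.filterMap_cons]
      cases (PySem.Dict.ofList item).get? "id" with
      | none => exact hx
      | some j => exact List.mem_cons_of_mem _ hx
    simp only [List.foldl_cons]
    have hstep : pvAStep pl d item = pvBStep best d item := by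
      unfold pvAStep pvBStep
      cases hj : (PySem.Dict.ofList item).get? "id" with
      | none => rfl
      | some j =>
        have hjmem : j ∈ pvIds (item :: rd) := by
          simp [pvIds, hj]
        simp [h j hjmem]
    rw [hstep]
    exact ih _ (fun x hx => h x (hsub x hx))

-- ===== VERDICT (by name: the statement is the Claim_ definition above) =====
theorem create_id_to_classification_map_spec : Claim_equal_create_id_to_classification_map := by
  intro rd pd _ _
  unfold Spec_create_id_to_classification_map create_id_to_classification_map create_id_to_classification_map_alt
  refine congrArg PySem.Dict.items (fold_eq _ _ _ _ ?_)
  intro i hi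
  rw [best_get? rd _ PySem.Dict.empty i]
  simp [hi]
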